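-- pv_equiv track=rewrite | github.com/joelact/Week-of-Code-36 | Revised Russian Roulette/Revised Russian Roulette.py | revisedRussianRoulette
-- ===== SOURCE A (Python) =====
-- def revisedRussianRoulette(doors, length):
--     # Complete this function
--     temp = list(doors)
--
--     cont_max = 0
--     cont_min = 0
--
--     size = length - 1
--
--     for i in doors:
--         if i == 1:
--             cont_max += 1
--
--     for i in range(size):
--         if temp[i] == 1:
--             cont_min += 1
--             if temp[i+1] == 1:
--                 temp[i+1] = 0
--
--     if temp[size] == 1:
--         cont_min += 1
--
--     result = []
--     result.append(cont_min)
--     result.append(cont_max)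
--
--     return result
-- ===== SOURCE B (Python) =====
-- def revisedRussianRoulette(doors, length):
--     # run-length decomposition: each maximal run of k consecutive closed doors
--     # among the first max(length, 0) doors needs (k + 1) // 2 knocks
--     cont_max = doors.count(1)
--     cont_min = 0
--     run = 0
--     for d in doors[:max(length, 0)]:
--         if d == 1:
--             run += 1
--         else:
--             cont_min += (run + 1) // 2
--             run = 0
--     cont_min += (run + 1) // 2
--     return [cont_min, cont_max]
-- ===== Notes on version B (the rewrite author's own statement) =====
-- stated objective: simpler
-- what changed: Replaces A's clone-and-zero greedy (mutating a copy and doing a separate final-cell check) with a single run-length scan of the first max(length,0) doors adding the closed form (run+1)//2 per maximal run of 1s, and counts cont_max with list.count.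
-- intended difference: When length <= 0 and doors[length-1] == 1, A wraps around with a negative index and returns cont_min = 1, while B counts the first max(length,0) = 0 doors and returns cont_min = 0, the intended value for an empty prefix. — e.g. on revisedRussianRoulette([1], 0): A returns [1, 1], B returns [0, 1]
import Mathlib
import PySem

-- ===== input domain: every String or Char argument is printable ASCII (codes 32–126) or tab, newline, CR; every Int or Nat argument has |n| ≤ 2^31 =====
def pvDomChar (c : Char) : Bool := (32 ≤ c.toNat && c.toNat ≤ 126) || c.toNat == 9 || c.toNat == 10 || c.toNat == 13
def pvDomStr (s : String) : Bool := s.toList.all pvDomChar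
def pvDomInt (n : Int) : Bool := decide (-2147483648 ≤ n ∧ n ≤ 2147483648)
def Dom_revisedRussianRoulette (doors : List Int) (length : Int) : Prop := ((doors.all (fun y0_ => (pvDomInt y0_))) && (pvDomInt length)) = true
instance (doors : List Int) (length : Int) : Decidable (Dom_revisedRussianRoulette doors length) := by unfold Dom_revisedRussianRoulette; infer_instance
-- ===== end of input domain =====

-- B replaces A's clone-and-zero greedy with a run-length scan adding (run+1)//2 per
-- maximal run of 1s in the first max(length,0) doors (simpler decomposition; same cost).


-- ===== PORT A =====
-- A's loop body: 'if temp[i] == 1: cont_min += 1; if temp[i+1] == 1: temp[i+1] = 0'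
-- (state = (temp, cont_min); pyGet?/pySetD are exact Python indexing incl. negatives)
def aBody (st : List Int × Int) (i : Int) : List Int × Int :=
  match PySem.List.pyGet? st.1 i with
  | none => st
  | some v =>
    if v == 1 then
      match PySem.List.pyGet? st.1 (i + 1) with
      | none => (st.1, st.2 + 1)
      | some w =>
        if w == 1 then (PySem.List.pySetD st.1 (i + 1) (0 : Int), st.2 + 1)
        else (st.1, st.2 + 1)
    else st

def revisedRussianRoulette (doors : List Int) (length : Int) : List Int :=
  let temp := doors
  let cont_max : Int := doors.foldl (fun acc i => if i == 1 then acc + 1 else acc) 0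
  let size := length - 1
  let st := (PySem.List.pyRange 0 size 1).foldl aBody (temp, (0 : Int))
  let cont_min : Int := if PySem.List.pyGet? st.1 size == some (1 : Int) then st.2 + 1 else st.2
  [cont_min, cont_max]

-- ===== PORT B =====
-- B's loop body: 'if d == 1: run += 1 else: cont_min += (run+1)//2; run = 0'  (state = (cont_min, run))
def bStep (st : Int × Int) (d : Int) : Int × Int :=
  if d == 1 then (st.1, st.2 + 1) else (st.1 + PySem.Int.floordiv (st.2 + 1) 2, 0)

def revisedRussianRoulette_alt (doors : List Int) (length : Int) : List Int :=
  let cont_max : Int := (PySem.List.count doors 1 : Int)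
  let st := (PySem.List.slice doors none (some (max length 0))).foldl bStep ((0 : Int), (0 : Int))
  [st.1 + PySem.Int.floordiv (st.2 + 1) 2, cont_max]

-- ===== PRECONDITION & SPEC =====
-- Pre_ = exactly the inputs where A returns (no IndexError): the loop reads and the final
-- read temp[length-1] stay in range (Python negative indexing included).
def Pre_revisedRussianRoulette (doors : List Int) (length : Int) : Prop :=
  length ≤ (doors.length : Int) ∧ 1 - length ≤ (doors.length : Int)
instance (doors : List Int) (length : Int) : Decidable (Pre_revisedRussianRoulette doors length) := by
  unfold Pre_revisedRussianRoulette; infer_instance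

def pvWitness_revisedRussianRoulette : List Int × Int := ([1, 1, 0, 1], 4)

-- When length ≤ 0 and doors[length-1] == 1, A wraps around with a negative index and
-- returns cont_min = 1, while B counts the empty prefix of the first max(length,0) = 0
-- doors and returns cont_min = 0, the intended value for an empty prefix.
def D_revisedRussianRoulette (doors : List Int) (length : Int) : Prop :=
  length ≤ 0 ∧ PySem.List.pyGet? doors (length - 1) = some 1
instance (doors : List Int) (length : Int) : Decidable (D_revisedRussianRoulette doors length) := by
  unfold D_revisedRussianRoulette; infer_instance

def Spec_revisedRussianRoulette (doors : List Int) (length : Int) (out : List Int) : Prop :=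
  ¬ D_revisedRussianRoulette doors length → out = revisedRussianRoulette_alt doors length
instance (doors : List Int) (length : Int) (out : List Int) : Decidable (Spec_revisedRussianRoulette doors length out) := by
  unfold Spec_revisedRussianRoulette; infer_instance

def pvDiffWitness_revisedRussianRoulette : List Int × Int := ([1], 0)
def pvDiffWitnessOut_revisedRussianRoulette : (List Int) × (List Int) := ([1, 1], [0, 1])

-- ===== CLAIM (what is proved, stated in full; the proofs are below) =====
def Claim_unchanged_revisedRussianRoulette : Prop := ∀ (doors : List Int) (length : Int), Dom_revisedRussianRoulette doors length → Pre_revisedRussianRoulette doors length → Spec_revisedRussianRoulette doors length (revisedRussianRoulette doors length)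
def Claim_changed_revisedRussianRoulette : Prop := Dom_revisedRussianRoulette (pvDiffWitness_revisedRussianRoulette.1) (pvDiffWitness_revisedRussianRoulette.2) ∧ Pre_revisedRussianRoulette (pvDiffWitness_revisedRussianRoulette.1) (pvDiffWitness_revisedRussianRoulette.2) ∧ D_revisedRussianRoulette (pvDiffWitness_revisedRussianRoulette.1) (pvDiffWitness_revisedRussianRoulette.2) ∧ revisedRussianRoulette (pvDiffWitness_revisedRussianRoulette.1) (pvDiffWitness_revisedRussianRoulette.2) = pvDiffWitnessOut_revisedRussianRoulette.1 ∧ revisedRussianRoulette_alt (pvDiffWitness_revisedRussianRoulette.1) (pvDiffWitness_revisedRussianRoulette.2) = pvDiffWitnessOut_revisedRussianRoulette.2 ∧ pvDiffWitnessOut_revisedRussianRoulette.1 ≠ pvDiffWitnessOut_revisedRussianRoulette.2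
def Claim_exact_revisedRussianRoulette : Prop := ∀ (doors : List Int) (length : Int), Dom_revisedRussianRoulette doors length → Pre_revisedRussianRoulette doors length → D_revisedRussianRoulette doors length → revisedRussianRoulette doors length ≠ revisedRussianRoulette_alt doors length

-- ===== LEMMAS AND PROOFS =====

-- structural form of A's greedy count on the processed prefix
def gMin : List Int → Int
  | [] => 0
  | [x] => if x = 1 then 1 else 0
  | x :: y :: t => if x = 1 then (if y = 1 then 1 + gMin t else 1 + gMin (y :: t)) else gMin (y :: t)

lemma gMin_cons_ne (x : Int) (l : List Int) (hx : x ≠ 1) : gMin (x :: l) = gMin l := by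
  cases l with
  | nil => simp [gMin, hx]
  | cons y t => simp [gMin, hx]

-- recursive form of B's run fold (with the cont_min accumulator split off)
def hB : List Int → Int → Int
  | [], r => PySem.Int.floordiv (r + 1) 2
  | d :: t, r => if d = 1 then hB t (r + 1) else PySem.Int.floordiv (r + 1) 2 + hB t 0

lemma bFold_cm : ∀ (l : List Int) (cm r : Int),
    l.foldl bStep (cm, r) = (cm + (l.foldl bStep (0, r)).1, (l.foldl bStep (0, r)).2) := by
  intro l
  induction l with
  | nil => intro cm r; simp
  | cons d t ih =>
    intro cm r
    by_cases hd : d = 1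
    · simp [bStep, hd, ih cm (r + 1)]
    · simp only [List.foldl_cons, bStep, beq_iff_eq, hd, if_false]
      rw [ih (cm + PySem.Int.floordiv (r + 1) 2) 0, ih (0 + PySem.Int.floordiv (r + 1) 2) 0]
      simp only [Prod.mk.injEq]
      refine ⟨by ring, ?_⟩
      try rfl
      try trivial

lemma hB_eq_fold : ∀ (l : List Int) (r : Int),
    (l.foldl bStep (0, r)).1 + PySem.Int.floordiv ((l.foldl bStep (0, r)).2 + 1) 2 = hB l r := by
  intro l
  induction l with
  | nil => intro r; simp [hB]
  | cons d t ih =>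
    intro r
    by_cases hd : d = 1
    · simp only [List.foldl_cons, bStep, beq_iff_eq, hd, if_true]
      exact ih (r + 1)
    · simp only [List.foldl_cons, bStep, beq_iff_eq, hd, if_false, hB]
      rw [bFold_cm t (0 + PySem.Int.floordiv (r + 1) 2) 0]
      have := ih 0
      simp only [] at this ⊢
      omega

lemma hB_shift : ∀ (t : List Int) (r : Int), hB t (r + 2) = 1 + hB t r := by
  intro t
  induction t with
  | nil =>
    intro r
    simp only [hB]
    rw [PySem.Int.floordiv_eq_ediv_of_pos (by norm_num), PySem.Int.floordiv_eq_ediv_of_pos (by norm_num)]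
    omega
  | cons d s ih =>
    intro r
    by_cases hd : d = 1
    · simp only [hB, hd, if_true]
      have := ih (r + 1)
      rw [show r + 1 + 2 = r + 2 + 1 by ring] at this
      omega
    · simp only [hB, hd, if_false]
      rw [PySem.Int.floordiv_eq_ediv_of_pos (by norm_num), PySem.Int.floordiv_eq_ediv_of_pos (by norm_num)]
      omega

lemma gMin_eq_hB_aux : ∀ (n : Nat) (l : List Int), l.length ≤ n → gMin l = hB l 0 := by
  intro n
  induction n with
  | zero =>
    intro l hl
    have : l = [] := List.eq_nil_of_length_eq_zero (by omega)
    subst this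
    decide
  | succ k ih =>
    intro l hl
    cases l with
    | nil => decide
    | cons x t =>
      cases t with
      | nil =>
        by_cases hx : x = 1
        · simp only [gMin, hB, hx, if_true]; decide
        · simp only [gMin, hB, hx, if_false]; decide
      | cons y s =>
        simp only [List.length_cons] at hl
        by_cases hx : x = 1
        · by_cases hy : y = 1
          · simp only [gMin, hB, hx, hy, if_true]
            rw [show (0 : Int) + 1 + 1 = 0 + 2 by ring, hB_shift s 0]
            rw [ih s (by omega)]
          · simp only [gMin, hB, hx, hy, if_true, if_false]
            rw [gMin_cons_ne y s hy, ih s (by omega)]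
            rw [show (0 : Int) + 1 + 1 = 2 by ring, show PySem.Int.floordiv 2 2 = 1 by decide]
        · rw [gMin_cons_ne x _ hx, ih (y :: s) (by simp; omega)]
          simp only [hB, hx, if_false]
          rw [show PySem.Int.floordiv (0 + 1) 2 = 0 by decide]
          ring

lemma gMin_eq_hB (l : List Int) : gMin l = hB l 0 := gMin_eq_hB_aux l.length l le_rfl

-- shift: running A's loop with all indices ≥ 1 over (x :: t) runs it shifted by one over t
lemma map_sub_one_pyRange (b : Int) :
    (PySem.List.pyRange 1 b 1).map (· - 1) = PySem.List.pyRange 0 (b - 1) 1 := by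
  rw [PySem.List.pyRange_one, PySem.List.pyRange_one, List.map_map]
  simp only [show b - 1 - 0 = b - 1 by ring]
  apply List.map_congr_left
  intro k _
  simp
  try omega

lemma aBody_shift (x : Int) (t : List Int) (cm i : Int) (hi : 1 ≤ i) :
    aBody (x :: t, cm) i = (x :: (aBody (t, cm) (i - 1)).1, (aBody (t, cm) (i - 1)).2) := by
  have h1 : PySem.List.pyGet? (x :: t) i = PySem.List.pyGet? t (i - 1) := by
    rw [PySem.List.pyGet?_of_nonneg _ (by omega : (0:Int) ≤ i),
        PySem.List.pyGet?_of_nonneg _ (by omega : (0:Int) ≤ i - 1)]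
    rw [show i.toNat = (i - 1).toNat + 1 by omega]
    simp
  have h2 : PySem.List.pyGet? (x :: t) (i + 1) = PySem.List.pyGet? t (i - 1 + 1) := by
    rw [PySem.List.pyGet?_of_nonneg _ (by omega : (0:Int) ≤ i + 1),
        PySem.List.pyGet?_of_nonneg _ (by omega : (0:Int) ≤ i - 1 + 1)]
    rw [show (i + 1).toNat = (i - 1 + 1).toNat + 1 by omega]
    simp
  have h3 : PySem.List.pySetD (x :: t) (i + 1) (0 : Int) = x :: PySem.List.pySetD t (i - 1 + 1) (0 : Int) := by
    rw [PySem.List.pySetD_of_nonneg _ _ (by omega : (0:Int) ≤ i + 1),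
        PySem.List.pySetD_of_nonneg _ _ (by omega : (0:Int) ≤ i - 1 + 1)]
    rw [show (i + 1).toNat = (i - 1 + 1).toNat + 1 by omega]
    simp
  simp only [aBody, h1, h2, h3]
  cases PySem.List.pyGet? t (i - 1) with
  | none => rfl
  | some v =>
    by_cases hv : v = 1
    · simp only [hv, beq_self_eq_true, if_true]
      cases PySem.List.pyGet? t (i - 1 + 1) with
      | none => rfl
      | some w =>
        by_cases hw : w = 1
        · simp [hw]
        · simp [hw]
    · simp [hv]

lemma loop_shift : ∀ (idxs : List Int) (x : Int) (t : List Int) (cm : Int),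
    (∀ i ∈ idxs, 1 ≤ i) →
    idxs.foldl aBody (x :: t, cm) =
      (x :: ((idxs.map (· - 1)).foldl aBody (t, cm)).1, ((idxs.map (· - 1)).foldl aBody (t, cm)).2) := by
  intro idxs
  induction idxs with
  | nil => intro x t cm _; rfl
  | cons i rest ih =>
    intro x t cm hall
    simp only [List.foldl_cons, List.map_cons]
    rw [aBody_shift x t cm i (hall i (by simp))]
    exact ih x _ _ (fun j hj => hall j (by simp [hj]))

-- A's loop over range(sz) plus the final temp[sz] check computes gMin of the first sz+1 doors
lemma aMin : ∀ (sz : Nat) (doors : List Int) (c : Int), sz < doors.length →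
    (if PySem.List.pyGet? ((PySem.List.pyRange 0 (sz : Int) 1).foldl aBody (doors, c)).1 (sz : Int) == some (1 : Int)
      then ((PySem.List.pyRange 0 (sz : Int) 1).foldl aBody (doors, c)).2 + 1
      else ((PySem.List.pyRange 0 (sz : Int) 1).foldl aBody (doors, c)).2)
    = c + gMin (doors.take (sz + 1)) := by
  intro sz
  induction sz with
  | zero =>
    intro doors c hlen
    cases doors with
    | nil => simp at hlen
    | cons x t =>
      rw [show ((0 : Nat) : Int) = 0 by norm_num, PySem.List.pyRange_one_eq_nil le_rfl]
      simp only [List.foldl_nil, PySem.List.pyGet?_zero_cons, List.take_succ_cons, List.take_zero]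
      by_cases hx : x = 1
      · simp [hx, gMin]
      · simp [hx, gMin]
  | succ k ih =>
    intro doors c hlen
    cases doors with
    | nil => simp at hlen
    | cons x rest =>
      cases rest with
      | nil => simp at hlen
      | cons y t =>
        have hk1 : ((k + 1 : Nat) : Int) = (k : Int) + 1 := by push_cast; ring
        rw [hk1, PySem.List.pyRange_one_cons (by positivity),
            show (0 : Int) + 1 = 1 by norm_num]
        simp only [List.foldl_cons]
        have hget0 : PySem.List.pyGet? (x :: y :: t) (0 : Int) = some x :=
          PySem.List.pyGet?_zero_cons ..
      -- after the i = 0 step, the remaining indices are all ≥ 1: shift onto the tail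
        have hshift : ∀ (t' : List Int) (c' : Int), k < t'.length →
            (if PySem.List.pyGet? ((PySem.List.pyRange 1 ((k : Int) + 1) 1).foldl aBody (x :: t', c')).1 ((k : Int) + 1) == some (1 : Int)
              then ((PySem.List.pyRange 1 ((k : Int) + 1) 1).foldl aBody (x :: t', c')).2 + 1
              else ((PySem.List.pyRange 1 ((k : Int) + 1) 1).foldl aBody (x :: t', c')).2)
            = c' + gMin (t'.take (k + 1)) := by
          intro t' c' hlen'
          rw [loop_shift _ _ _ _ (fun i hi => (PySem.List.mem_pyRange_one.1 hi).1),
              map_sub_one_pyRange, show (k : Int) + 1 - 1 = (k : Int) by ring]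
          rw [PySem.List.pyGet?_cons_succ]
          exact ih t' c' hlen'
        by_cases hx : x = 1
        · by_cases hy : y = 1
          · have hstep : aBody (x :: y :: t, c) 0 = (x :: 0 :: t, c + 1) := by
              simp only [aBody, hx, hy]
              rw [PySem.List.pySetD_of_nonneg _ _ (by norm_num : (0:Int) ≤ 0 + 1)]
              simp
            rw [hstep, hshift (0 :: t) (c + 1) (by simp at hlen ⊢; omega)]
            subst hx; subst hy
            cases t with
            | nil =>
              have : k = 0 := by simp at hlen; omega
              subst this
              simp [gMin]
            | cons z s =>
              rcases Nat.eq_zero_or_pos k with h0 | h0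
              · subst h0
                simp [gMin]
              · rw [show k = (k - 1) + 1 by omega]
                simp only [List.take_succ_cons, gMin, if_true]
                norm_num
                omega
          · have hstep : aBody (x :: y :: t, c) 0 = (x :: y :: t, c + 1) := by
              simp [aBody, hx, hy]
            rw [hstep, hshift (y :: t) (c + 1) (by simp at hlen ⊢; omega)]
            subst hx
            simp only [List.take_succ_cons, gMin, if_true, hy, if_false]
            ring
        · have hstep : aBody (x :: y :: t, c) 0 = (x :: y :: t, c) := by
            simp [aBody, hget0, hx]
          rw [hstep, hshift (y :: t) c (by simp at hlen ⊢; omega)]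
          rw [show List.take (k + 1 + 1) (x :: y :: t) = x :: List.take (k + 1) (y :: t) from rfl,
              gMin_cons_ne x _ hx]

-- cont_max agreement: A's counting fold is doors.count(1)
lemma contMax_eq (doors : List Int) :
    doors.foldl (fun acc i => if i == 1 then acc + 1 else acc) (0 : Int) = (PySem.List.count doors 1 : Int) := by
  rw [PySem.List.foldl_beq_add_one, PySem.List.count_eq]
  simp

-- ===== VERDICT (by name: the statement is the Claim_ definition above) =====
theorem revisedRussianRoulette_spec : Claim_unchanged_revisedRussianRoulette := by
  intro doors length _ hpre
  obtain ⟨h1, h2⟩ := hpre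
  intro hnd
  simp only [revisedRussianRoulette, revisedRussianRoulette_alt]
  by_cases hl : length ≤ 0
  · -- length ≤ 0: A's loop is empty and (¬ D_) says the wrapped read is not 1; B's prefix is empty
    have hget : ¬ PySem.List.pyGet? doors (length - 1) = some 1 := fun h => hnd ⟨hl, h⟩
    rw [PySem.List.pyRange_one_eq_nil (by omega)]
    simp only [List.foldl_nil]
    rw [if_neg (by simpa using hget)]
    rw [show max length 0 = 0 by omega, PySem.List.slice_to doors (by norm_num)]
    simp only [Int.toNat_zero, List.take_zero, List.foldl_nil]
    rw [contMax_eq]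
    norm_num
  · -- 1 ≤ length: both sides compute gMin of the first `length` doors
    have hn : length = ((length.toNat - 1 : Nat) : Int) + 1 := by omega
    have hlen : length.toNat - 1 < doors.length := by omega
    rw [show length - 1 = ((length.toNat - 1 : Nat) : Int) by omega]
    rw [aMin (length.toNat - 1) doors 0 hlen, zero_add]
    rw [show max length 0 = length by omega, PySem.List.slice_to doors (by omega)]
    rw [show length.toNat = (length.toNat - 1) + 1 by omega]
    rw [hB_eq_fold (doors.take (length.toNat - 1 + 1)) 0, ← gMin_eq_hB]
    rw [contMax_eq]
    rw [show length.toNat - 1 + 1 - 1 + 1 = length.toNat - 1 + 1 by omega]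

theorem revisedRussianRoulette_changed : Claim_changed_revisedRussianRoulette := by
  unfold Claim_changed_revisedRussianRoulette; decide

theorem revisedRussianRoulette_tight : Claim_exact_revisedRussianRoulette := by
  intro doors length _ _ hd heq
  obtain ⟨hl, hget⟩ := hd
  simp only [revisedRussianRoulette, revisedRussianRoulette_alt] at heq
  rw [PySem.List.pyRange_one_eq_nil (by omega)] at heq
  simp only [List.foldl_nil] at heq
  rw [if_pos (by simpa using hget)] at heq
  rw [show max length 0 = 0 by omega, PySem.List.slice_to doors (by norm_num)] at heq
  simp at heq
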